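-- pv_equiv track=rewrite | github.com/labbit-eu/transport_tools | libs/geometry.py | get_redundant_path_ids
-- ===== SOURCE A (Python) =====
-- from typing import Dict, List, Optional, Set, Tuple, Union, TYPE_CHECKING, Iterable
--
-- def get_redundant_path_ids(all_paths: Dict[int, List[str]]) -> Set[int]:
--     """
--     Detects node paths that are subset of another node paths from all_paths
--     :param all_paths: paths to analyze
--     :return: set of IDs of redundant paths that are subsets of others
--     """
--
--     # sort paths based on their length
--     length_paths = list()
--
--     for path_id, path in all_paths.items():
--         length_paths.append((len(path), path_id))
--     sorted_paths = sorted(length_paths, reverse=True)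
--
--     # pairwise path comparison
--     redundant_path_ids = set()
--     for i, path_tuple in enumerate(sorted_paths[:-1]):
--         path_len, path_id = path_tuple
--         if path_id in redundant_path_ids:
--             continue
--
--         path = all_paths[path_id]
--         for other_path_tuple in sorted_paths[i + 1:]:
--             other_path_len, other_path_id = other_path_tuple
--             other_path = all_paths[other_path_id]
--             # since after sorting other_path_len <= path_len
--             last_index = other_path_len
--             if path[:last_index] == other_path[:last_index] or path[path_len - other_path_len:] == other_path:
--                 # is the shared part same from the beginning or from the end
--                 redundant_path_ids.add(other_path_id)
--
--     return redundant_path_ids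
-- ===== SOURCE B (Python) =====
-- def get_redundant_path_ids(all_paths):
--     """
--     Detects node paths that are subset of another node paths from all_paths
--     :param all_paths: paths to analyze
--     :return: set of IDs of redundant paths that are subsets of others
--     """
--     contents = {path_id: tuple(path) for path_id, path in all_paths.items()}
--
--     order = sorted(((len(path), path_id) for path_id, path in all_paths.items()),
--                    reverse=True)
--
--     redundant_path_ids = set()
--     for i, (path_len, path_id) in enumerate(order):
--         if path_id in redundant_path_ids:
--             continue
--
--         path = contents[path_id]
--         # every prefix and every suffix of this path, for O(1) lookups
--         sub_paths = {path[:k] for k in range(path_len + 1)}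
--         sub_paths.update(path[k:] for k in range(path_len + 1))
--
--         for _, other_id in order[i + 1:]:
--             if contents[other_id] in sub_paths:
--                 redundant_path_ids.add(other_id)
--
--     return redundant_path_ids
-- ===== Notes on version B (the rewrite author's own statement) =====
-- stated objective: faster
-- what changed: Instead of comparing two slices of every later path pairwise, B precomputes for each surviving path the hash set of all its prefixes and suffixes and tests each later path's content by a single set membership lookup.
import Mathlib
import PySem

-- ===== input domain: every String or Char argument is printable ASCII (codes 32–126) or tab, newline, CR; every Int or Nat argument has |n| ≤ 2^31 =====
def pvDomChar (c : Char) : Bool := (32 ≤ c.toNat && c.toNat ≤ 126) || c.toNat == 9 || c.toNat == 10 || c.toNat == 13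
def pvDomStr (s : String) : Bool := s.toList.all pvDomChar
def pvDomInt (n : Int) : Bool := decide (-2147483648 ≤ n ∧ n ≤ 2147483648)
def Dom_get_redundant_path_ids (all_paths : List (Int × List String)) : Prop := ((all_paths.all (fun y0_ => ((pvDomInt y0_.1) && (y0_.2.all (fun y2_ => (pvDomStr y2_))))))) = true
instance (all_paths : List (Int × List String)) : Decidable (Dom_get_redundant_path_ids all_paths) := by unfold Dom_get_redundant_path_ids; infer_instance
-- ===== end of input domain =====

-- B replaces A's two slice comparisons per pair by one membership test in a per-survivor
-- precomputed set of all its prefixes and suffixes (objective: faster, constant factor).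

-- ===== PORT A =====
def get_redundant_path_ids (all_paths : List (Int × List String)) : List Int :=
  let d : PySem.Dict Int (List String) := PySem.Dict.ofList all_paths
  let length_paths : List (Int × Int) :=
    d.items.foldl (fun acc pv => acc ++ [(PySem.List.len pv.2, pv.1)]) []
  let sorted_paths := PySem.List.sorted2 length_paths (fun t => t.1) (fun t => t.2) true
  (PySem.List.enumerate (PySem.List.slice sorted_paths none (some (-1))) 0).foldl
    (fun (red : PySem.Set Int) ipt =>
      if PySem.Set.contains red ipt.2.2 then red
      else
        let path := (PySem.Dict.get? d ipt.2.2).getD []   -- key always present: no KeyError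
        (PySem.List.slice sorted_paths (some (ipt.1 + 1)) none).foldl
          (fun red opt =>
            let other := (PySem.Dict.get? d opt.2).getD []
            if PySem.List.slice path none (some opt.1) = PySem.List.slice other none (some opt.1)
               ∨ PySem.List.slice path (some (ipt.2.1 - opt.1)) none = other
            then PySem.Set.add red opt.2 else red)
          red)
    PySem.Set.empty

-- ===== PORT B =====
def get_redundant_path_ids_alt (all_paths : List (Int × List String)) : List Int :=
  let d : PySem.Dict Int (List String) := PySem.Dict.ofList all_paths
  let contents : PySem.Dict Int (List String) :=
    d.items.foldl (fun c pv => c.insert pv.1 pv.2) PySem.Dict.empty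
  let order := PySem.List.sorted2 (d.items.map (fun pv => (PySem.List.len pv.2, pv.1)))
      (fun t => t.1) (fun t => t.2) true
  (PySem.List.enumerate order 0).foldl
    (fun (red : PySem.Set Int) ip =>
      if PySem.Set.contains red ip.2.2 then red
      else
        let path := (PySem.Dict.get? contents ip.2.2).getD []   -- key always present
        let subs : PySem.Set (List String) :=
          PySem.Set.update
            (PySem.Set.ofList ((PySem.List.pyRange 0 (ip.2.1 + 1) 1).map
              (fun k => PySem.List.slice path none (some k))))
            ((PySem.List.pyRange 0 (ip.2.1 + 1) 1).map
              (fun k => PySem.List.slice path (some k) none))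
        (PySem.List.slice order (some (ip.1 + 1)) none).foldl
          (fun red o =>
            if PySem.Set.contains subs ((PySem.Dict.get? contents o.2).getD [])
            then PySem.Set.add red o.2 else red)
          red)
    PySem.Set.empty

-- ===== PRECONDITION & SPEC =====
def Spec_get_redundant_path_ids (all_paths : List (Int × List String)) (out : List Int) : Prop := out = get_redundant_path_ids_alt all_paths
instance (all_paths : List (Int × List String)) (out : List Int) : Decidable (Spec_get_redundant_path_ids all_paths out) := by unfold Spec_get_redundant_path_ids; infer_instance

-- ===== CLAIM (what is proved, stated in full; the proofs are below) =====
def Claim_equal_get_redundant_path_ids : Prop := ∀ (all_paths : List (Int × List String)), Dom_get_redundant_path_ids all_paths → Spec_get_redundant_path_ids all_paths (get_redundant_path_ids all_paths)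

-- ===== LEMMAS AND PROOFS =====

-- Python's lexicographic comparison of int pairs, via Mathlib's Prod.Lex
lemma pv_lex_lt (a b : Int × Int) : toLex a < toLex b ↔ (a.1 < b.1 ∨ (a.1 = b.1 ∧ a.2 < b.2)) :=
  Prod.Lex.lt_iff

-- sorted2 on Int-pair keys is `sorted` with the lexicographic key
lemma pv_sorted2_pairs_eq_sorted (xs : List (Int × Int)) (rev : Bool) :
    PySem.List.sorted2 xs (fun t => t.1) (fun t => t.2) rev = PySem.List.sorted xs toLex rev := by
  have hcomp : (fun (a b : Int × Int) => (decide (a.1 < b.1) || (!decide (b.1 < a.1) && decide (a.2 < b.2))))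
      = (fun (a b : Int × Int) => decide (toLex a < toLex b)) := by
    funext a b
    rw [Bool.eq_iff_iff]
    simp only [Bool.or_eq_true, Bool.and_eq_true, Bool.not_eq_true', decide_eq_true_eq,
      decide_eq_false_iff_not, pv_lex_lt]
    omega
  have hswap : (fun (a b : Int × Int) => (decide (b.1 < a.1) || (!decide (a.1 < b.1) && decide (b.2 < a.2))))
      = (fun (a b : Int × Int) => decide (toLex b < toLex a)) := by
    funext a b; exact congrFun (congrFun hcomp b) a
  cases rev with
  | false =>
    simp only [PySem.List.sorted2, PySem.List.sorted, Bool.false_eq_true, if_false]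
    rw [hcomp]
  | true =>
    simp only [PySem.List.sorted2, PySem.List.sorted, if_true]
    rw [hswap]

-- the (length, id) pairs built from a dict's items
def pvPairs (d : PySem.Dict Int (List String)) : List (Int × Int) :=
  d.items.map (fun pv => (PySem.List.len pv.2, pv.1))

lemma pv_mem_pairs (d : PySem.Dict Int (List String)) (hnd : d.keys.Nodup) (x : Int × Int) :
    x ∈ pvPairs d ↔ ∃ pa, PySem.Dict.get? d x.2 = some pa ∧ (pa.length : Int) = x.1 := by
  unfold pvPairs
  simp only [List.mem_map]
  constructor
  · rintro ⟨pv, hpv, rfl⟩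
    exact ⟨pv.2, PySem.Dict.get?_of_mem_items d hpv hnd, by simp [PySem.List.len_eq]⟩
  · rintro ⟨pa, hget, hlen⟩
    refine ⟨(x.2, pa), PySem.Dict.mem_items_of_get?_eq_some d hget, ?_⟩
    have : PySem.List.len pa = x.1 := by rw [PySem.List.len_eq]; exact hlen
    rw [this]

lemma pv_nodup_pairs (d : PySem.Dict Int (List String)) (hnd : d.keys.Nodup) :
    (pvPairs d).Nodup := by
  have h : (pvPairs d).map (fun t => t.2) = d.keys := by
    unfold pvPairs PySem.Dict.keys
    rw [List.map_map]
    rfl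
  exact List.Nodup.of_map _ (h ▸ hnd)

-- the dict rebuilt by inserting every item from the empty dict answers like the original
lemma pv_get?_foldl_insert (l : List (Int × List String)) (hnd : (l.map (fun pv => pv.1)).Nodup)
    (c : PySem.Dict Int (List String)) (k : Int) :
    (l.foldl (fun c pv => c.insert pv.1 pv.2) c).get? k
      = match l.find? (fun pv => pv.1 == k) with
        | some pv => some pv.2
        | none => c.get? k := by
  induction l generalizing c with
  | nil => simp
  | cons a l ih =>
    rw [List.foldl_cons, ih (by simpa using (List.nodup_cons.1 (by simpa using hnd)).2)]
    by_cases hk : a.1 = k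
    · have hfind : l.find? (fun pv => pv.1 == k) = none := by
        rw [List.find?_eq_none]
        intro pv hpv
        simp only [beq_iff_eq]
        intro he
        have hmem : a.1 ∈ l.map (fun pv => pv.1) := by
          rw [hk, ← he]; exact List.mem_map_of_mem hpv
        exact (List.nodup_cons.1 (by simpa using hnd)).1 hmem
      rw [hfind, List.find?_cons_of_pos (by simpa using hk)]
      subst hk
      simp [PySem.Dict.get?_insert_self]
    · rw [List.find?_cons_of_neg (by simpa using hk)]
      cases hfind : l.find? (fun pv => pv.1 == k) with
      | some pv => simp
      | none => simp [PySem.Dict.get?_insert, show ¬ k = a.1 from fun h => hk h.symm]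

-- contents = {pid: path for …} looks up exactly like the original dict
lemma pv_contents_get? (d : PySem.Dict Int (List String)) (hnd : d.keys.Nodup) (k : Int) :
    (d.items.foldl (fun c pv => c.insert pv.1 pv.2) PySem.Dict.empty).get? k = PySem.Dict.get? d k := by
  have hnd' : (d.items.map (fun pv => pv.1)).Nodup := by
    have : d.items.map (fun pv => pv.1) = d.keys := rfl
    rw [this]; exact hnd
  rw [pv_get?_foldl_insert _ hnd' _ k]
  cases hfind : d.items.find? (fun pv => pv.1 == k) with
  | some pv =>
    have hp : pv.1 = k := by simpa using List.find?_some hfind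
    have hmem := List.mem_of_find?_eq_some hfind
    have hget := PySem.Dict.get?_of_mem_items d hmem hnd
    rw [hp] at hget
    simp [hget]
  | none =>
    cases hget : PySem.Dict.get? d k with
    | none => simp [PySem.Dict.get?_empty]
    | some v =>
      exfalso
      have hmem := PySem.Dict.mem_items_of_get?_eq_some d hget
      have := List.find?_eq_none.1 hfind _ hmem
      simp at this

-- in a strictly (lexicographically) descending arrangement of l, the part after p
-- holds exactly the elements of l lexicographically below p
lemma pv_mem_rest (pre rest : List (Int × Int)) (p x : Int × Int) (l : List (Int × Int))
    (hperm : (pre ++ p :: rest).Perm l)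
    (hpair : (pre ++ p :: rest).Pairwise (fun a b => toLex b < toLex a)) :
    x ∈ rest → x ∈ l ∧ toLex x < toLex p := by
  rcases List.pairwise_append.1 hpair with ⟨hp1, hp2, hcross⟩
  intro hx
  refine ⟨hperm.mem_iff.1 (by simp [hx]), ?_⟩
  exact (List.pairwise_cons.1 hp2).1 x hx

-- A's pair condition (two slice comparisons) ⟺ the other path is one of the prefixes/suffixes
lemma pv_cond_iff (pa ob : List String) (L m' : Int)
    (hL : (pa.length : Int) = L) (hm' : (ob.length : Int) = m') (hle : m' ≤ L) :
    (PySem.List.slice pa none (some m') = PySem.List.slice ob none (some m')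
      ∨ PySem.List.slice pa (some (L - m')) none = ob)
    ↔ ((∃ m, (0 ≤ m ∧ m < L + 1) ∧ PySem.List.slice pa none (some m) = ob)
      ∨ (∃ m, (0 ≤ m ∧ m < L + 1) ∧ PySem.List.slice pa (some m) none = ob)) := by
  have h0' : (0 : Int) ≤ m' := by
    have := Int.natCast_nonneg ob.length; omega
  have hob_self : PySem.List.slice ob none (some m') = ob := by
    rw [PySem.List.slice_to ob h0', show m'.toNat = ob.length from by omega, List.take_length]
  constructor
  · rintro (h | h)
    · exact Or.inl ⟨m', ⟨h0', by omega⟩, by rw [h, hob_self]⟩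
    · exact Or.inr ⟨L - m', ⟨by omega, by omega⟩, h⟩
  · rintro (⟨m, ⟨h0m, hmL⟩, h⟩ | ⟨m, ⟨h0m, hmL⟩, h⟩)
    · have h' : pa.take m.toNat = ob := by rw [← PySem.List.slice_to pa h0m]; exact h
      have hlen : ob.length = min m.toNat pa.length := by rw [← h', List.length_take]
      have hmm : m = m' := by omega
      rw [hmm] at h
      exact Or.inl (by rw [h, hob_self])
    · have h' : pa.drop m.toNat = ob := by rw [← PySem.List.slice_from pa h0m]; exact h
      have hlen : ob.length = pa.length - m.toNat := by rw [← h', List.length_drop]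
      have hmm : m = L - m' := by omega
      rw [hmm] at h
      exact Or.inr h

-- congruence of the skip-guard
lemma pv_if_congr (b : Bool) (r x y : PySem.Set Int) (h : x = y) :
    (if b = true then r else x) = (if b = true then r else y) := by
  cases b <;> simp [h]

lemma pv_if_skip (b : Bool) (r y : PySem.Set Int) (h : r = y) :
    r = if b = true then r else y := by
  cases b <;> simp [h]

-- the rebuilt contents dict (B's only helper structure)
def pvContents (d : PySem.Dict Int (List String)) : PySem.Dict Int (List String) :=
  d.items.foldl (fun c pv => c.insert pv.1 pv.2) PySem.Dict.empty

-- THE per-step lemma: over the strictly-later entries, A's slice comparisons and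
-- B's membership test in the prefix/suffix set mark exactly the same ids, in order
lemma pv_step_eq (d : PySem.Dict Int (List String)) (pre rest : List (Int × Int)) (p : Int × Int)
    (hnd : d.keys.Nodup)
    (hperm : (pre ++ p :: rest).Perm (pvPairs d))
    (hpair : (pre ++ p :: rest).Pairwise (fun a b => toLex b < toLex a))
    (red : PySem.Set Int) :
    rest.foldl (fun red opt =>
        if PySem.List.slice ((PySem.Dict.get? d p.2).getD []) none (some opt.1) =
             PySem.List.slice ((PySem.Dict.get? d opt.2).getD []) none (some opt.1)
           ∨ PySem.List.slice ((PySem.Dict.get? d p.2).getD []) (some (p.1 - opt.1)) none =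
             (PySem.Dict.get? d opt.2).getD []
        then PySem.Set.add red opt.2 else red) red
    = rest.foldl (fun red o =>
        if PySem.Set.contains
             (PySem.Set.update
               (PySem.Set.ofList ((PySem.List.pyRange 0 (p.1 + 1) 1).map
                 (fun k => PySem.List.slice ((PySem.Dict.get? (pvContents d) p.2).getD []) none (some k))))
               ((PySem.List.pyRange 0 (p.1 + 1) 1).map
                 (fun k => PySem.List.slice ((PySem.Dict.get? (pvContents d) p.2).getD []) (some k) none)))
             ((PySem.Dict.get? (pvContents d) o.2).getD [])
        then PySem.Set.add red o.2 else red) red := by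
  obtain ⟨pa, hgetp, hlenp⟩ := (pv_mem_pairs d hnd p).1 (hperm.mem_iff.1 (by simp))
  apply PySem.List.foldl_congr_mem
  intro acc x hx
  obtain ⟨hxl, hlt⟩ := pv_mem_rest pre rest p x _ hperm hpair hx
  obtain ⟨ob, hgetx, hlenx⟩ := (pv_mem_pairs d hnd x).1 hxl
  have hC : ∀ k, PySem.Dict.get? (pvContents d) k = PySem.Dict.get? d k := fun k =>
    pv_contents_get? d hnd k
  rw [hC, hC, hgetp, hgetx]
  simp only [Option.getD_some]
  have hle : x.1 ≤ p.1 := by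
    rcases (pv_lex_lt x p).1 hlt with h | ⟨h, _⟩ <;> omega
  have hiff := pv_cond_iff pa ob p.1 x.1 hlenp hlenx hle
  have hmem : (PySem.Set.contains
      (PySem.Set.update
        (PySem.Set.ofList ((PySem.List.pyRange 0 (p.1 + 1) 1).map
          (fun k => PySem.List.slice pa none (some k))))
        ((PySem.List.pyRange 0 (p.1 + 1) 1).map
          (fun k => PySem.List.slice pa (some k) none))) ob) = true
      ↔ ((∃ m, (0 ≤ m ∧ m < p.1 + 1) ∧ PySem.List.slice pa none (some m) = ob)
        ∨ (∃ m, (0 ≤ m ∧ m < p.1 + 1) ∧ PySem.List.slice pa (some m) none = ob)) := by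
    rw [PySem.Set.contains_iff, PySem.Set.mem_update, PySem.Set.mem_ofList]
    simp only [List.mem_map, PySem.List.mem_pyRange_one]
  exact if_congr (hiff.trans hmem.symm) rfl rfl

-- outer loop: A's traversal of order[:-1] equals B's traversal of the whole order
lemma pv_outer (d : PySem.Dict Int (List String)) (s : List (Int × Int))
    (hnd : d.keys.Nodup) (hperm : s.Perm (pvPairs d))
    (hpair : s.Pairwise (fun a b => toLex b < toLex a)) :
    ∀ (rest pre : List (Int × Int)) (red : PySem.Set Int), s = pre ++ rest →
      (PySem.List.enumerate rest.dropLast (pre.length : Int)).foldl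
        (fun red ipt =>
          if PySem.Set.contains red ipt.2.2 then red
          else
            (PySem.List.slice s (some (ipt.1 + 1)) none).foldl
              (fun red opt =>
                if PySem.List.slice ((PySem.Dict.get? d ipt.2.2).getD []) none (some opt.1) =
                     PySem.List.slice ((PySem.Dict.get? d opt.2).getD []) none (some opt.1)
                   ∨ PySem.List.slice ((PySem.Dict.get? d ipt.2.2).getD []) (some (ipt.2.1 - opt.1)) none =
                     (PySem.Dict.get? d opt.2).getD []
                then PySem.Set.add red opt.2 else red) red) red
      = (PySem.List.enumerate rest (pre.length : Int)).foldl
          (fun red ip =>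
            if PySem.Set.contains red ip.2.2 then red
            else
              (PySem.List.slice s (some (ip.1 + 1)) none).foldl
                (fun red o =>
                  if PySem.Set.contains
                       (PySem.Set.update
                         (PySem.Set.ofList ((PySem.List.pyRange 0 (ip.2.1 + 1) 1).map
                           (fun k => PySem.List.slice ((PySem.Dict.get? (pvContents d) ip.2.2).getD []) none (some k))))
                         ((PySem.List.pyRange 0 (ip.2.1 + 1) 1).map
                           (fun k => PySem.List.slice ((PySem.Dict.get? (pvContents d) ip.2.2).getD []) (some k) none)))
                       ((PySem.Dict.get? (pvContents d) o.2).getD [])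
                  then PySem.Set.add red o.2 else red) red) red := by
  intro rest
  induction rest with
  | nil => intro pre red hs; rfl
  | cons p rtl ih =>
    intro pre red hs
    have htail : PySem.List.slice s (some ((pre.length : Int) + 1)) none = rtl := by
      rw [show ((pre.length : Int) + 1) = (((pre ++ [p]).length : Nat) : Int) from by simp,
        PySem.List.slice_from_natCast, hs,
        show pre ++ p :: rtl = (pre ++ [p]) ++ rtl from by simp, List.drop_left]
    have hstep := pv_step_eq d pre rtl p hnd (hs ▸ hperm) (hs ▸ hpair) red
    cases rtl with
    | nil =>
      show red = _
      rw [PySem.List.enumerate_cons, List.foldl_cons]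
      rw [show (PySem.List.enumerate ([] : List (Int × Int)) ((pre.length : Int) + 1)) = [] from rfl,
        List.foldl_nil]
      refine pv_if_skip _ _ _ ?_
      rw [htail, List.foldl_nil]
    | cons q tl =>
      rw [List.dropLast_cons₂, PySem.List.enumerate_cons, PySem.List.enumerate_cons,
        List.foldl_cons, List.foldl_cons]
      have hx : (PySem.List.slice s (some ((pre.length : Int) + 1)) none).foldl
          (fun red (opt : Int × Int) =>
            if PySem.List.slice ((PySem.Dict.get? d p.2).getD []) none (some opt.1) =
                 PySem.List.slice ((PySem.Dict.get? d opt.2).getD []) none (some opt.1)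
               ∨ PySem.List.slice ((PySem.Dict.get? d p.2).getD []) (some (p.1 - opt.1)) none =
                 (PySem.Dict.get? d opt.2).getD []
            then PySem.Set.add red opt.2 else red) red
          = (PySem.List.slice s (some ((pre.length : Int) + 1)) none).foldl
              (fun red (o : Int × Int) =>
                if PySem.Set.contains
                     (PySem.Set.update
                       (PySem.Set.ofList ((PySem.List.pyRange 0 (p.1 + 1) 1).map
                         (fun k => PySem.List.slice ((PySem.Dict.get? (pvContents d) p.2).getD []) none (some k))))
                       ((PySem.List.pyRange 0 (p.1 + 1) 1).map
                         (fun k => PySem.List.slice ((PySem.Dict.get? (pvContents d) p.2).getD []) (some k) none)))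
                     ((PySem.Dict.get? (pvContents d) o.2).getD [])
                then PySem.Set.add red o.2 else red) red := by
        rw [htail]
        exact hstep
      rw [show ((pre.length : Int) + 1) = (((pre ++ [p]).length : Nat) : Int) from by simp] at hx ⊢
      rw [ih (pre ++ [p]) _ (by simpa using hs)]
      exact congrArg (fun r => List.foldl _ r (PySem.List.enumerate (q :: tl) _))
        (pv_if_congr _ _ _ _ hx)

-- zeta-expanded forms of the two ports over the shared dict
def pvRunA (d : PySem.Dict Int (List String)) : List Int :=
  (PySem.List.enumerate (PySem.List.slice (PySem.List.sorted2 (d.items.foldl (fun acc pv => acc ++ [(PySem.List.len pv.2, pv.1)]) []) (fun t => t.1) (fun t => t.2) true) none (some (-1))) 0).foldl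
    (fun red ipt =>
      if PySem.Set.contains red ipt.2.2 then red
      else
        (PySem.List.slice (PySem.List.sorted2 (d.items.foldl (fun acc pv => acc ++ [(PySem.List.len pv.2, pv.1)]) []) (fun t => t.1) (fun t => t.2) true) (some (ipt.1 + 1)) none).foldl
          (fun red opt =>
            if PySem.List.slice ((PySem.Dict.get? d ipt.2.2).getD []) none (some opt.1) =
                 PySem.List.slice ((PySem.Dict.get? d opt.2).getD []) none (some opt.1)
               ∨ PySem.List.slice ((PySem.Dict.get? d ipt.2.2).getD []) (some (ipt.2.1 - opt.1)) none =
                 (PySem.Dict.get? d opt.2).getD []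
            then PySem.Set.add red opt.2 else red) red)
    PySem.Set.empty

def pvRunB (d : PySem.Dict Int (List String)) : List Int :=
  (PySem.List.enumerate (PySem.List.sorted2 (d.items.map (fun pv => (PySem.List.len pv.2, pv.1))) (fun t => t.1) (fun t => t.2) true) 0).foldl
    (fun red ip =>
      if PySem.Set.contains red ip.2.2 then red
      else
        (PySem.List.slice (PySem.List.sorted2 (d.items.map (fun pv => (PySem.List.len pv.2, pv.1))) (fun t => t.1) (fun t => t.2) true) (some (ip.1 + 1)) none).foldl
          (fun red o =>
            if PySem.Set.contains
                 (PySem.Set.update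
                   (PySem.Set.ofList ((PySem.List.pyRange 0 (ip.2.1 + 1) 1).map
                     (fun k => PySem.List.slice ((PySem.Dict.get? (pvContents d) ip.2.2).getD []) none (some k))))
                   ((PySem.List.pyRange 0 (ip.2.1 + 1) 1).map
                     (fun k => PySem.List.slice ((PySem.Dict.get? (pvContents d) ip.2.2).getD []) (some k) none)))
                 ((PySem.Dict.get? (pvContents d) o.2).getD [])
            then PySem.Set.add red o.2 else red) red)
    PySem.Set.empty

lemma pv_A_eq_runA (all_paths : List (Int × List String)) :
    get_redundant_path_ids all_paths = pvRunA (PySem.Dict.ofList all_paths) := rfl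

lemma pv_B_eq_runB (all_paths : List (Int × List String)) :
    get_redundant_path_ids_alt all_paths = pvRunB (PySem.Dict.ofList all_paths) := rfl

lemma pv_master (d : PySem.Dict Int (List String)) (hnd : d.keys.Nodup) :
    pvRunA d = pvRunB d := by
  unfold pvRunA pvRunB
  rw [show (d.items.foldl (fun acc pv => acc ++ [(PySem.List.len pv.2, pv.1)]) []) =
      d.items.map (fun pv => (PySem.List.len pv.2, pv.1)) from by
    simpa using PySem.List.foldl_append_singleton_eq_map
      (fun pv : Int × List String => (PySem.List.len pv.2, pv.1)) d.items []]
  rw [pv_sorted2_pairs_eq_sorted (d.items.map (fun pv => (PySem.List.len pv.2, pv.1))) true]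
  rw [PySem.List.slice_to_neg_one]
  have hperm : (PySem.List.sorted (d.items.map (fun pv => (PySem.List.len pv.2, pv.1))) toLex true).Perm
      (pvPairs d) := PySem.List.sorted_perm _ _ _
  have hnodup : (PySem.List.sorted (d.items.map (fun pv => (PySem.List.len pv.2, pv.1))) toLex true).Nodup :=
    hperm.nodup_iff.2 (pv_nodup_pairs d hnd)
  have hpair : (PySem.List.sorted (d.items.map (fun pv => (PySem.List.len pv.2, pv.1))) toLex true).Pairwise
      (fun a b => toLex b < toLex a) := by
    have h1 := PySem.List.sorted_pairwise_rev (d.items.map (fun pv => (PySem.List.len pv.2, pv.1))) toLex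
    exact (h1.and hnodup).imp (fun {a b} h =>
      lt_of_le_of_ne h.1 (fun e => h.2 (toLex_inj.1 e.symm)))
  exact pv_outer d _ hnd hperm hpair _ [] PySem.Set.empty rfl

-- ===== VERDICT (by name: the statement is the Claim_ definition above) =====
theorem get_redundant_path_ids_spec : Claim_equal_get_redundant_path_ids := by
  intro all_paths _
  show get_redundant_path_ids all_paths = get_redundant_path_ids_alt all_paths
  rw [pv_A_eq_runA, pv_B_eq_runB]
  exact pv_master _ (PySem.Dict.nodup_keys_ofList all_paths)
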